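-- pv_equiv track=rewrite | github.com/SMWHff/demo | 每日一题/【每日一题0910】打字员.py | typist
-- ===== SOURCE A (Python) =====
-- def typist(words: str) -> int:
--     # 键盘初始默认是小写状态，Cpas Lock灯关闭
--     Cpas_Lock = False
--     # 计数器初始化为0
--     count = 0
--     # 遍历每个字母
--     for s in words:
--         # 获取单个字母的 ASCII码
--         strCode = ord(s)
--         # 判断字母是大写还是小写
--         # 大写字母ASCII码范围：65~90
--         # 小写字母ASCII码范围：97~122
--         strStatu = "大写字母" if strCode < 97 else "小写字母"
--         if Cpas_Lock == False and strStatu == "大写字母":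
--             # 如果 Cpas Lock灯熄灭的，且敲出的是大写字母
--             # 那么必需按 Cpas Lock建，将键盘大写打开才能敲出来
--             Cpas_Lock = True
--             # 计数器 +1
--             count += 1
--         elif Cpas_Lock == True and strStatu == "小写字母" :
--             # 如果 Cpas Lock灯亮着，且敲出的是小写字母
--             # 那么必需按 Cpas Lock建，将键盘大写关闭才能敲出来
--             Cpas_Lock = False
--             # 计数器 +1
--             count += 1
--         # 敲出字母本身，计数器 +1
--         count += 1
--     # 返回计数器的值
--     return count
-- ===== SOURCE B (Python) =====
-- def typist(words: str) -> int:
--     # Staged run-length computation: build a case mask, split it on lowercase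
--     # markers to get the maximal uppercase runs; each run costs one CapsLock
--     # press to enter and one to leave, except no leaving press after a run
--     # that ends the text.
--     mask = ''.join('U' if ord(c) < 97 else 'l' for c in words)
--     blocks = [b for b in mask.split('l') if b]
--     toggles = 2 * len(blocks) - (1 if mask.endswith('U') else 0)
--     return len(words) + toggles
-- ===== Notes on version B (the rewrite author's own statement) =====
-- stated objective: alternative
-- what changed: Replaces A's per-character CapsLock state machine with a staged run-length computation: build a case mask string, split it on lowercase markers to count maximal uppercase runs, and charge two CapsLock presses per run minus one if the text ends uppercase.
import Mathlib
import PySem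

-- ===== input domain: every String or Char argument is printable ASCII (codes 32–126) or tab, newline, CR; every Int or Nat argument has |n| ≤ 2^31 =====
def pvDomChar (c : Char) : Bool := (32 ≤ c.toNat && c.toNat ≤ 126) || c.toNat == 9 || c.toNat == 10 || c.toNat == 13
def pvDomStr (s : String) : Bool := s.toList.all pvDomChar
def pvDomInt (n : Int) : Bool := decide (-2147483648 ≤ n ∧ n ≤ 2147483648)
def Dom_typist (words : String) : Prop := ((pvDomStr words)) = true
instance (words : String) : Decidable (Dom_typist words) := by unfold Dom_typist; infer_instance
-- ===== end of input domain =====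

-- B replaces A's per-character CapsLock state machine with a staged run-length
-- computation (case mask, split on lowercase markers, two presses per uppercase
-- run minus one if the text ends uppercase); alternative decomposition, same cost.

-- ===== PORT A =====
-- literal transliteration: one loop-body step updating (Cpas_Lock, count)
def typistStep (st : Bool × Int) (s : Char) : Bool × Int :=
  let strCode := s.toNat
  let strStatu : String := if strCode < 97 then "大写字母" else "小写字母"
  if st.1 = false ∧ strStatu = "大写字母" then
    (true, st.2 + 1 + 1)
  else if st.1 = true ∧ strStatu = "小写字母" then
    (false, st.2 + 1 + 1)
  else
    (st.1, st.2 + 1)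

def typist (words : String) : Int :=
  (words.toList.foldl typistStep (false, 0)).2

-- ===== PORT B =====
-- mask = ''.join('U' if ord(c) < 97 else 'l' for c in words)
-- blocks = [b for b in mask.split('l') if b]
-- toggles = 2*len(blocks) - (1 if mask.endswith('U') else 0)
-- return len(words) + toggles
def typist_alt (words : String) : Int :=
  let mask : String :=
    PySem.Str.join "" (words.toList.map (fun c => if c.toNat < 97 then "U" else "l"))
  let blocks : List String := ((PySem.Str.split? mask "l").getD []).filter (fun b => b ≠ "")
  let toggles : Int := 2 * (blocks.length : Int) - (if PySem.Str.endswith mask "U" then 1 else 0)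
  (PySem.Str.len words : Int) + toggles

-- ===== PRECONDITION & SPEC =====
def Spec_typist (words : String) (out : Int) : Prop := out = typist_alt words
instance (words : String) (out : Int) : Decidable (Spec_typist words out) := by unfold Spec_typist; infer_instance

-- ===== CLAIM (what is proved, stated in full; the proofs are below) =====
def Claim_equal_typist : Prop := ∀ (words : String), Dom_typist words → Spec_typist words (typist words)

-- ===== LEMMAS AND PROOFS =====

-- case of a character under A's rule
def pvUp (c : Char) : Bool := decide (c.toNat < 97)

-- number of CapsLock toggles A performs starting from lock state b
def pvRun (b : Bool) : List Char → Nat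
  | [] => 0
  | c :: r => (if b ≠ pvUp c then 1 else 0) + pvRun (pvUp c) r

theorem pvA_fold (l : List Char) : ∀ (lock : Bool) (count : Int),
    (l.foldl typistStep (lock, count)).2 = count + l.length + (pvRun lock l : Int) := by
  induction l with
  | nil => intro lock count; simp [pvRun]
  | cons c r ih =>
    intro lock count
    have hs : ∀ b k, List.foldl typistStep (b, k) (c :: r) = List.foldl typistStep (typistStep (b, k) c) r := fun _ _ => rfl
    by_cases h : c.toNat < 97 <;> cases lock <;>
      simp only [hs, typistStep, h, if_pos, if_neg, pvRun, pvUp] <;>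
      simp [h] <;> rw [ih] <;> push_cast <;> ring

-- B's mask as a character list
def pvMaskC (c : Char) : Char := if c.toNat < 97 then 'U' else 'l'
def pvMask (l : List Char) : List Char := l.map pvMaskC

-- clean structural recursion for splitting on 'l'
def pvSp : List Char → List (List Char)
  | [] => [[]]
  | c :: r => if c = 'l' then [] :: pvSp r else (pvSp r).modifyHead (c :: ·)

theorem pvSp_ne_nil : ∀ (m : List Char), pvSp m ≠ [] := by
  intro m
  induction m with
  | nil => simp [pvSp]
  | cons c r ih =>
    simp only [pvSp]
    split
    · simp
    · cases hsp : pvSp r with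
      | nil => exact absurd hsp ih
      | cons a t => simp [hsp, List.modifyHead]

theorem pvGo (fuel : Nat) : ∀ (l cur : List Char) (accs : List (List Char)),
    l.length < fuel →
    PySem.Chars.splitOn.go ['l'] fuel l cur accs =
      accs.reverse ++ (pvSp l).modifyHead (fun x => cur.reverse ++ x) := by
  induction fuel with
  | zero => intro l cur accs h; omega
  | succ f ih =>
    intro l cur accs h
    cases l with
    | nil =>
      simp [PySem.Chars.splitOn.go, pvSp, List.modifyHead]
    | cons c rest =>
      by_cases hc : c = 'l'
      · subst hc
        have hpre : ['l'].isPrefixOf ('l' :: rest) = true := by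
          simp [List.isPrefixOf]
        rw [PySem.Chars.splitOn.go]
        simp only [hpre, if_pos]
        rw [show List.drop ['l'].length ('l' :: rest) = rest from rfl]
        rw [ih rest [] (cur.reverse :: accs) (by simpa using Nat.lt_of_succ_lt_succ h)]
        cases hsp : pvSp rest with
        | nil => exact absurd hsp (pvSp_ne_nil rest)
        | cons a t =>
          simp [pvSp, List.modifyHead, hsp]
      · have hpre : ['l'].isPrefixOf (c :: rest) = false := by
          simp [List.isPrefixOf]
          intro hcl
          exact hc hcl.symm
        rw [PySem.Chars.splitOn.go]
        simp only [hpre, Bool.false_eq_true, if_neg, not_false_iff]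
        rw [ih rest (c :: cur) accs (by simpa using Nat.lt_of_succ_lt_succ h)]
        cases hsp : pvSp rest with
        | nil => exact absurd hsp (pvSp_ne_nil rest)
        | cons a t =>
          simp [pvSp, List.modifyHead, hsp, hc]

theorem pvSplitOn_eq (m : List Char) : PySem.Chars.splitOn m ['l'] = pvSp m := by
  unfold PySem.Chars.splitOn
  rw [pvGo (m.length + 1) m [] [] (by omega)]
  cases hsp : pvSp m with
  | nil => exact absurd hsp (pvSp_ne_nil m)
  | cons a t => simp [List.modifyHead]

-- run counter over the mask: b = currently inside an uppercase run
def pvRb : Bool → List Char → Nat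
  | _, [] => 0
  | b, c :: r => if c = 'l' then pvRb false r else (if b then 0 else 1) + pvRb true r

theorem pvSp_count (m : List Char) :
    ((pvSp m).countP (fun x => decide (x ≠ []))) = pvRb false m ∧
    ((pvSp m).tail.countP (fun x => decide (x ≠ []))) = pvRb true m := by
  induction m with
  | nil => simp [pvSp, pvRb]
  | cons c r ih =>
    obtain ⟨ih1, ih2⟩ := ih
    simp only [ne_eq, decide_not] at ih1 ih2 ⊢
    by_cases hc : c = 'l'
    · subst hc
      simp [pvSp, pvRb, List.countP_cons, ih1]
    · cases hsp : pvSp r with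
      | nil => exact absurd hsp (pvSp_ne_nil r)
      | cons a t =>
        have h2 := ih2
        rw [hsp] at h2
        simp only [List.tail] at h2
        have hcons : pvSp (c :: r) = (c :: a) :: t := by
          simp [pvSp, hc, hsp, List.modifyHead]
        constructor
        · rw [hcons, List.countP_cons, h2]
          simp [pvRb, hc]
          omega
        · rw [hcons]
          simp only [List.tail]
          rw [h2]
          simp [pvRb, hc]

-- uppercase-run counter over the original characters, lock-state style
def pvUruns : Bool → List Char → Nat
  | _, [] => 0
  | b, c :: r => (if pvUp c && !b then 1 else 0) + pvUruns (pvUp c) r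

theorem pvRb_mask (l : List Char) : ∀ b, pvRb b (pvMask l) = pvUruns b l := by
  induction l with
  | nil => intro b; simp [pvMask, pvRb, pvUruns]
  | cons c r ih =>
    intro b
    by_cases h : c.toNat < 97 <;> cases b <;>
      simp [pvMask, pvMaskC, pvRb, pvUruns, pvUp, h, ih] at ih ⊢ <;>
      simp [ih]

-- final lock state of A
def pvEnds : Bool → List Char → Bool
  | b, [] => b
  | _, c :: r => pvEnds (pvUp c) r

theorem pvRun_toggles (l : List Char) : ∀ b,
    (pvRun b l : Int) + (if pvEnds b l then 1 else 0) =
      2 * (pvUruns b l : Int) + (if b then 1 else 0) := by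
  induction l with
  | nil => intro b; simp [pvRun, pvEnds, pvUruns]
  | cons c r ih =>
    intro b
    have h1 := ih (pvUp c)
    by_cases h : c.toNat < 97 <;> cases b <;>
      simp [pvRun, pvEnds, pvUruns, pvUp, h] at h1 ⊢ <;>
      push_cast at h1 ⊢ <;> omega

theorem pvEnds_last (l : List Char) : ∀ b,
    pvEnds b l = (match l.getLast? with | none => b | some c => pvUp c) := by
  induction l with
  | nil => intro b; simp [pvEnds]
  | cons c r ih =>
    intro b
    cases r with
    | nil => simp [pvEnds]
    | cons d t =>
      cases hg : (d :: t).getLast? with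
      | none => exact absurd (List.getLast?_eq_none_iff.mp hg) (by simp)
      | some e =>
        have h := ih (pvUp c)
        rw [hg] at h
        show pvEnds (pvUp c) (d :: t) = _
        rw [List.getLast?_cons_cons, hg, h]

theorem pvSuffix_singleton (s : List Char) (a : Char) : [a] <:+ s ↔ s.getLast? = some a := by
  constructor
  · rintro ⟨t, rfl⟩
    simp
  · intro h
    obtain ⟨ys, rfl⟩ := List.getLast?_eq_some_iff.mp h
    exact ⟨ys, rfl⟩

theorem pvEndswith (l : List Char) :
    PySem.Chars.endswith (pvMask l) ['U'] = pvEnds false l := by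
  cases hl : l.getLast? with
  | none =>
    have : l = [] := List.getLast?_eq_none_iff.mp hl
    subst this
    decide
  | some d =>
    have hml : (pvMask l).getLast? = some (pvMaskC d) := by
      simp [pvMask, List.getLast?_map, hl]
    rw [pvEnds_last l false, hl]
    show PySem.Chars.endswith (pvMask l) ['U'] = pvUp d
    by_cases hu : d.toNat < 97
    · have : pvUp d = true := by simp [pvUp, hu]
      rw [this]
      exact (PySem.Chars.endswith_iff _ _).mpr
        ((pvSuffix_singleton _ _).mpr (by rw [hml]; simp [pvMaskC, hu]))
    · have hud : pvUp d = false := by simp [pvUp, hu]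
      rw [hud]
      apply Bool.eq_false_iff.mpr
      intro hcontra
      have hsuf := (PySem.Chars.endswith_iff _ _).mp hcontra
      have := (pvSuffix_singleton _ _).mp hsuf
      rw [hml] at this
      simp [pvMaskC, hu] at this

theorem pvMask_toList (l : List Char) :
    (PySem.Str.join "" (l.map (fun c => if c.toNat < 97 then "U" else "l"))).toList = pvMask l := by
  rw [PySem.Str.toList_join, List.map_map]
  have hfun : (String.toList ∘ fun c => if c.toNat < 97 then "U" else "l") =
      fun c => [pvMaskC c] := by
    funext c
    by_cases h : c.toNat < 97 <;> simp [pvMaskC, h] <;> decide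
  rw [hfun]
  have : (fun c => [pvMaskC c]) = (fun c => [c]) ∘ pvMaskC := rfl
  rw [this, ← List.map_map]
  have hsep : ("" : String).toList = ([] : List Char) := by decide
  rw [hsep, PySem.Chars.join_nil_singletons]
  rfl

theorem pvOfList_ne_empty (x : List Char) : (String.ofList x ≠ "") ↔ x ≠ [] := by
  constructor
  · intro h hx; subst hx; exact h (by decide)
  · intro h hx
    apply h
    have := congrArg String.toList hx
    simpa using this

theorem pvLenFilter {A : Type} (p : A → Bool) (l : List A) :
    (l.filter p).length = l.countP p := by
  induction l with
  | nil => simp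
  | cons a t ih => by_cases h : p a <;> simp [List.filter_cons, List.countP_cons, h, ih]

theorem pvBlocks (m : List Char) :
    (((pvSp m).map String.ofList).filter (fun b => b ≠ "")).length = pvRb false m := by
  rw [pvLenFilter, List.countP_map]
  rw [← (pvSp_count m).1]
  apply List.countP_congr
  intro x _
  simp [Function.comp, pvOfList_ne_empty x]

-- ===== VERDICT (by name: the statement is the Claim_ definition above) =====
theorem typist_spec : Claim_equal_typist := by
  intro words _
  unfold Spec_typist
  simp only [typist, typist_alt]
  rw [pvA_fold]
  have hml := pvMask_toList words.toList
  have hsplit : PySem.Str.split?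
      (PySem.Str.join "" (words.toList.map (fun c => if c.toNat < 97 then "U" else "l"))) "l"
      = some ((pvSp (pvMask words.toList)).map String.ofList) := by
    unfold PySem.Str.split? PySem.Chars.split?
    rw [show ("l" : String).toList = ['l'] from by decide, hml]
    simp [List.isEmpty, pvSplitOn_eq]
  have hend : PySem.Str.endswith
      (PySem.Str.join "" (words.toList.map (fun c => if c.toNat < 97 then "U" else "l"))) "U"
      = pvEnds false words.toList := by
    rw [PySem.Str.endswith_eq, hml, show ("U" : String).toList = ['U'] from by decide, pvEndswith]
  rw [hsplit, hend, PySem.Str.len_eq]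
  simp only [Option.getD_some]
  rw [pvBlocks, pvRb_mask words.toList false]
  have htog := pvRun_toggles words.toList false
  cases hE : pvEnds false words.toList <;>
    simp only [hE, if_true, if_false, Bool.false_eq_true, if_neg, if_pos] at htog ⊢ <;>
    push_cast at htog ⊢ <;> omega
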